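-- pv_equiv track=rewrite | github.com/abelkent/Daily-coding-challenge | 2023/3. March/05.03.2023 - Nearest large value in an array.py | nearest_large_finder
-- ===== SOURCE A (Python) =====
-- def nearest_large_finder(array, starting_index):
--
--     #Retrieves value to beat from array and provided index
--     value_to_beat = array[starting_index]
--
--     #Left check
--     def left_check(starting_index):
--         distance = int(1)
--         for index in range(starting_index-1,-1,-1):
--             if array[index] > value_to_beat:
--                 return (distance)
--             else:
--                 distance += 1
--         return (None)
--
--     #Right check
--     def right_check(starting_index):
--         distance = int(1)
--         for index in range(starting_index+1, len(array),1):
--             if array[index] > value_to_beat: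
--                 return (distance)
--             else:
--                 distance += 1
--         return (None)
--
--     #Sets left and right as the minimal distance to a larger value on the left and right of the given index provided respectively
--     left, right = left_check(starting_index), right_check(starting_index)
--
--     #If both are None, ie, there is no larger value - returns None
--     if (left == None) and (right == None):
--         return None
--
--     #If only one of them is None, return the other
--     if left == None:
--         return right
--     elif right == None:
--         return left
--
--     #Otherwise returns minimum value of the two
--     else:
--         return min(left, right)
-- ===== SOURCE B (Python) =====
-- def nearest_large_finder(array, starting_index):
--     value_to_beat = array[starting_index]
--     n = len(array)
--     d = 1
--     while starting_index - d >= 0 or starting_index + d < n: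
--         if starting_index - d >= 0 and array[starting_index - d] > value_to_beat:
--             return d
--         if starting_index + d < n and array[starting_index + d] > value_to_beat:
--             return d
--         d += 1
--     return None
-- ===== Notes on version B (the rewrite author's own statement) =====
-- stated objective: alternative
-- what changed: Replaced A's two separate full directional passes (left scan, right scan, then min-combining of the two distances) by a single interleaved outward loop over the distance d that checks both sides at each d and returns the first d where either side holds a larger value.
import Mathlib
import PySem

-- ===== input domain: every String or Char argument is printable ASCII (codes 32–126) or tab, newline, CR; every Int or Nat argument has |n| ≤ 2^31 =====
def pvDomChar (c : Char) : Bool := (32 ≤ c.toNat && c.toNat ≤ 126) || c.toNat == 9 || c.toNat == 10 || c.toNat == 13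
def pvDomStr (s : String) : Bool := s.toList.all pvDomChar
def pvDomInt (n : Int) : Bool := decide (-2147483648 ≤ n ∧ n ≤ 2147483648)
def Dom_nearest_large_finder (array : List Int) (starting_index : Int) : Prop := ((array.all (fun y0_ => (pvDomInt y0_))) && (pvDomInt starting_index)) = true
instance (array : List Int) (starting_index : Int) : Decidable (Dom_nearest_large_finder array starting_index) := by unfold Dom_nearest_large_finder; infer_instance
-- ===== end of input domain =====

-- B replaces A's two separate directional passes (left scan, right scan, then min) by one
-- interleaved outward scan returning the first distance at which either side beats the value
-- (objective: alternative decomposition; same asymptotic cost).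

-- ===== PORT A =====
-- A's left_check / right_check are the same loop over a range of indices with a distance
-- counter; pvScanA is that loop (left gets range(si-1,-1,-1), right gets range(si+1,len,1)).
def pvScanA (array : List Int) (v : Int) (idxs : List Int) (distance : Int) : Option Int :=
  match idxs with
  | [] => none
  | i :: rest =>
    if PySem.List.pyGetD array i 0 > v then some distance
    else pvScanA array v rest (distance + 1)

def nearest_large_finder (array : List Int) (starting_index : Int) : Option Int :=
  match PySem.List.pyGet? array starting_index with
  | none => none  -- array[starting_index] raises IndexError: outside Pre_
  | some value_to_beat =>
    let left := pvScanA array value_to_beat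
      (PySem.List.pyRange (starting_index - 1) (-1) (-1)) 1
    let right := pvScanA array value_to_beat
      (PySem.List.pyRange (starting_index + 1) (array.length : Int) 1) 1
    match left, right with
    | none, none => none
    | none, some r => some r
    | some l, none => some l
    | some l, some r => some (min l r)

-- ===== PORT B =====
-- B's while loop: d grows outward; fuel bounds the (terminating) while loop.
def pvOutward (array : List Int) (v si n d : Int) (fuel : Nat) : Option Int :=
  match fuel with
  | 0 => none
  | fuel + 1 =>
    if si - d ≥ 0 ∨ si + d < n then
      if si - d ≥ 0 ∧ PySem.List.pyGetD array (si - d) 0 > v then some d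
      else if si + d < n ∧ PySem.List.pyGetD array (si + d) 0 > v then some d
      else pvOutward array v si n (d + 1) fuel
    else none

def nearest_large_finder_alt (array : List Int) (starting_index : Int) : Option Int :=
  match PySem.List.pyGet? array starting_index with
  | none => none
  | some value_to_beat =>
    pvOutward array value_to_beat starting_index (array.length : Int) 1
      (2 * array.length + 2)

-- ===== PRECONDITION & SPEC =====
-- A raises IndexError on array[starting_index] when starting_index is out of range; Pre_
-- admits exactly the inputs on which A returns normally.
def Pre_nearest_large_finder (array : List Int) (starting_index : Int) : Prop :=
  PySem.Raise.InRange array.length starting_index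
instance (array : List Int) (starting_index : Int) : Decidable (Pre_nearest_large_finder array starting_index) := by unfold Pre_nearest_large_finder; infer_instance

def pvWitness_nearest_large_finder : List Int × Int := ([1, 3, 2], 0)

def Spec_nearest_large_finder (array : List Int) (starting_index : Int) (out : Option Int) : Prop := out = nearest_large_finder_alt array starting_index
instance (array : List Int) (starting_index : Int) (out : Option Int) : Decidable (Spec_nearest_large_finder array starting_index out) := by unfold Spec_nearest_large_finder; infer_instance

-- ===== CLAIM (what is proved, stated in full; the proofs are below) =====
def Claim_equal_nearest_large_finder : Prop := ∀ (array : List Int) (starting_index : Int), Dom_nearest_large_finder array starting_index → Pre_nearest_large_finder array starting_index → Spec_nearest_large_finder array starting_index (nearest_large_finder array starting_index)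

-- ===== LEMMAS AND PROOFS =====

-- A's scan returns a distance no smaller than its starting counter.
theorem pvScanA_ge (array : List Int) (v : Int) :
    ∀ (idxs : List Int) (d r : Int), pvScanA array v idxs d = some r → d ≤ r := by
  intro idxs
  induction idxs with
  | nil => intro d r h; simp [pvScanA] at h
  | cons i rest ih =>
    intro d r h
    simp only [pvScanA] at h
    split at h
    · have := Option.some.inj h; omega
    · have := ih (d + 1) r h; omega

-- A's combining branch, as in the port.
def pvCombine (l r : Option Int) : Option Int :=
  match l, r with
  | none, none => none
  | none, some r => some r
  | some l, none => some l
  | some l, some r => some (min l r)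

-- invariant: at distance d, combining A's two remaining directional scans equals B's loop.
theorem pvInvariant (array : List Int) (v si : Int) :
    ∀ (fuel : Nat) (d : Int), 1 ≤ d →
      (si - d + 1).toNat ≤ fuel → ((array.length : Int) - si - d).toNat ≤ fuel →
      pvCombine
        (pvScanA array v (PySem.List.pyRange (si - d) (-1) (-1)) d)
        (pvScanA array v (PySem.List.pyRange (si + d) (array.length : Int) 1) d)
      = pvOutward array v si (array.length : Int) d fuel := by
  intro fuel
  induction fuel with
  | zero =>
    intro d hd h1 h2
    rw [PySem.List.pyRange_neg_one_eq_nil (by omega), PySem.List.pyRange_one_eq_nil (by omega)]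
    simp [pvScanA, pvCombine, pvOutward]
  | succ fuel ih =>
    intro d hd h1 h2
    by_cases hcont : si - d ≥ 0 ∨ si + d < (array.length : Int)
    · by_cases hL : si - d ≥ 0
      · rw [PySem.List.pyRange_neg_one_cons (by omega : (-1 : Int) < si - d)]
        by_cases hLhit : PySem.List.pyGetD array (si - d) 0 > v
        · -- left hit at distance d
          have hBeq : pvOutward array v si (array.length : Int) d (fuel + 1) = some d := by
            simp only [pvOutward]
            rw [if_pos hcont, if_pos (⟨hL, hLhit⟩ :
              si - d ≥ 0 ∧ PySem.List.pyGetD array (si - d) 0 > v)]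
          rw [hBeq]
          simp only [pvScanA, if_pos hLhit]
          cases hR : pvScanA array v (PySem.List.pyRange (si + d) (array.length : Int) 1) d with
          | none => rfl
          | some r =>
            have := pvScanA_ge array v _ d r hR
            simp only [pvCombine]
            rw [min_eq_left this]
        · simp only [pvScanA, if_neg hLhit]
          have hnL : ¬(si - d ≥ 0 ∧ PySem.List.pyGetD array (si - d) 0 > v) :=
            fun h => hLhit h.2
          by_cases hRin : si + d < (array.length : Int)
          · rw [PySem.List.pyRange_one_cons (by omega : si + d < (array.length : Int))]
            by_cases hRhit : PySem.List.pyGetD array (si + d) 0 > v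
            · -- right hit at distance d, left missed
              have hBeq : pvOutward array v si (array.length : Int) d (fuel + 1) = some d := by
                simp only [pvOutward]
                rw [if_pos hcont, if_neg hnL, if_pos (⟨hRin, hRhit⟩ :
                  si + d < (array.length : Int) ∧ PySem.List.pyGetD array (si + d) 0 > v)]
              rw [hBeq]
              simp only [pvScanA, if_pos hRhit]
              cases hL2 : pvScanA array v
                  (PySem.List.pyRange (si - d - 1) (-1) (-1)) (d + 1) with
              | none => rfl
              | some l =>
                have := pvScanA_ge array v _ (d + 1) l hL2
                simp only [pvCombine]
                rw [min_eq_right (by omega : d ≤ l)]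
            · -- neither hit: recurse
              have hnR : ¬(si + d < (array.length : Int) ∧
                  PySem.List.pyGetD array (si + d) 0 > v) := fun h => hRhit h.2
              have hBeq : pvOutward array v si (array.length : Int) d (fuel + 1)
                  = pvOutward array v si (array.length : Int) (d + 1) fuel := by
                simp only [pvOutward]
                rw [if_pos hcont, if_neg hnL, if_neg hnR]
              rw [hBeq]
              simp only [pvScanA, if_neg hRhit]
              have := ih (d + 1) (by omega) (by omega) (by omega)
              rw [(by ring : si - (d + 1) = si - d - 1),
                  (by ring : si + (d + 1) = si + d + 1)] at this
              exact this
          · -- right side exhausted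
            rw [PySem.List.pyRange_one_eq_nil (by omega)]
            have hnR : ¬(si + d < (array.length : Int) ∧
                PySem.List.pyGetD array (si + d) 0 > v) := fun h => hRin h.1
            have hBeq : pvOutward array v si (array.length : Int) d (fuel + 1)
                = pvOutward array v si (array.length : Int) (d + 1) fuel := by
              simp only [pvOutward]
              rw [if_pos hcont, if_neg hnL, if_neg hnR]
            rw [hBeq]
            have := ih (d + 1) (by omega) (by omega) (by omega)
            rw [(by ring : si - (d + 1) = si - d - 1),
                PySem.List.pyRange_one_eq_nil
                  (by omega : (array.length : Int) ≤ si + (d + 1))] at this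
            simpa [pvScanA] using this
      · -- left side exhausted; loop continues on the right
        have hRin : si + d < (array.length : Int) := by tauto
        have hnL : ¬(si - d ≥ 0 ∧ PySem.List.pyGetD array (si - d) 0 > v) :=
          fun h => hL h.1
        rw [PySem.List.pyRange_neg_one_eq_nil (by omega),
            PySem.List.pyRange_one_cons (by omega : si + d < (array.length : Int))]
        by_cases hRhit : PySem.List.pyGetD array (si + d) 0 > v
        · have hBeq : pvOutward array v si (array.length : Int) d (fuel + 1) = some d := by
            simp only [pvOutward]
            rw [if_pos hcont, if_neg hnL, if_pos (⟨hRin, hRhit⟩ :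
              si + d < (array.length : Int) ∧ PySem.List.pyGetD array (si + d) 0 > v)]
          rw [hBeq]
          simp only [pvScanA, if_pos hRhit]
          rfl
        · have hnR : ¬(si + d < (array.length : Int) ∧
              PySem.List.pyGetD array (si + d) 0 > v) := fun h => hRhit h.2
          have hBeq : pvOutward array v si (array.length : Int) d (fuel + 1)
              = pvOutward array v si (array.length : Int) (d + 1) fuel := by
            simp only [pvOutward]
            rw [if_pos hcont, if_neg hnL, if_neg hnR]
          rw [hBeq]
          simp only [pvScanA, if_neg hRhit]
          have := ih (d + 1) (by omega) (by omega) (by omega)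
          rw [(by ring : si + (d + 1) = si + d + 1),
              PySem.List.pyRange_neg_one_eq_nil (by omega : si - (d + 1) ≤ -1)] at this
          simpa [pvScanA] using this
    · -- loop ends: both ranges empty
      have hBeq : pvOutward array v si (array.length : Int) d (fuel + 1) = none := by
        simp only [pvOutward]
        rw [if_neg hcont]
      rw [hBeq, PySem.List.pyRange_neg_one_eq_nil (by omega),
          PySem.List.pyRange_one_eq_nil (by omega)]
      rfl

-- ===== VERDICT (by name: the statement is the Claim_ definition above) =====
theorem nearest_large_finder_spec : Claim_equal_nearest_large_finder := by
  intro array si _hdom hpre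
  unfold Spec_nearest_large_finder nearest_large_finder nearest_large_finder_alt
  cases hv : PySem.List.pyGet? array si with
  | none => rfl
  | some v =>
    simp only
    have hin : -(array.length : Int) ≤ si ∧ si < (array.length : Int) := by
      have := hpre; unfold Pre_nearest_large_finder PySem.Raise.InRange at this; omega
    have := pvInvariant array v si (2 * array.length + 2) 1 (by omega) (by omega)
    exact this (by omega)
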